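-- pv_equiv track=rewrite | github.com/divyajeettt/sequences | sequences/__init__.py | gould
-- ===== SOURCE A (Python) =====
-- import math
--
-- def check(n: int) -> int:
--     """checks if arg 'n' is a positive int"""
--
--     if not isinstance(n, int):
--         raise TypeError ("'n' must be an int")
--     if n <= 0:
--         raise ValueError ("'n' must be a positive integer")
--     return n
--
-- def whole(n: int) -> list[int]:
--     """returns the first n Whole Numbers
--     0, 1, 2, 3, 4, 5, 6, 7, 8, 9, ..., n-1"""
--
--     return list(range(check(n)))
--
-- def natural(n: int) -> list[int]:
--     """returns the first n Natural Numbers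
--     1, 2, 3, 4, 5, 6, 7, 8, 9, 10, ..., n"""
--
--     return whole(check(n) + 1)[1:]
--
-- def pascal(n: int) -> list[int]:
--     """returns the n-th row of the Pascal's triangle
--     n-th row of Pascal's Triangle is given by:
--         Pₙ = ⁿCᵣ for r ∈ range(n+1)"""
--
--     return [math.comb(n, r) for r in range(n+1)]
--
-- def gould(n: int) -> list[int]:
--     """returns the first n terms of the Gould Sequence
--     Gould Number:
--         the count of odd numbers in the n-th row of pascal's triangle
--         Tₙ = count(odd numbers in pascal(n))"""
--
--     n, numbers = check(n), list()
--
--     for i in natural(n):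
--         count = 0
--         for num in pascal(i):
--             if num % 2:
--                 count += 1
--         numbers.append(count)
--
--     return numbers
-- ===== SOURCE B (Python) =====
-- def gould(n: int) -> list[int]:
--     if not isinstance(n, int):
--         raise TypeError("'n' must be an int")
--     if n <= 0:
--         raise ValueError("'n' must be a positive integer")
--     return [2 ** bin(i).count("1") for i in range(1, n + 1)]
-- ===== Notes on version B (the rewrite author's own statement) =====
-- stated objective: faster
-- what changed: Replaces the nested loops that build each Pascal row with math.comb and count its odd entries by the closed form 2**popcount(i) (Glaisher/Kummer), computed directly per index; input validation (raising on n <= 0) is kept.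
import Mathlib
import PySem

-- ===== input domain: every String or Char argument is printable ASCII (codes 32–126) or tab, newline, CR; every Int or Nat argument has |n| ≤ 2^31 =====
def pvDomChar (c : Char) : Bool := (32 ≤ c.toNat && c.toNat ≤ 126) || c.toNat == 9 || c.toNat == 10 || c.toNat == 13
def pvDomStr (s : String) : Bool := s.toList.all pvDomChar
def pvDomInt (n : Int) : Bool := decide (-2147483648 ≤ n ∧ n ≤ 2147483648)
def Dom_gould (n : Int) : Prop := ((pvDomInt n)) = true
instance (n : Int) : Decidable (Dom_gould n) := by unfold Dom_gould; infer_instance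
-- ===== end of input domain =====

-- B replaces A's per-row Pascal-triangle scans with the closed form 2^popcount(i) per term (Lucas' theorem); return-value equivalence on n ≥ 1 (both raise ValueError on n ≤ 0, excluded by Pre_).


-- ===== PORT A =====
-- check(n) raises for n ≤ 0 (excluded by Pre_gould); inside Pre_ check is the identity.
-- whole(n) = list(range(n))
def pvWhole (n : Int) : List Int := PySem.List.pyRange 0 n 1
-- natural(n) = whole(n+1)[1:]
def pvNatural (n : Int) : List Int := PySem.List.slice (pvWhole (n + 1)) (some 1) none
-- pascal(n) = [math.comb(n, r) for r in range(n+1)]; math.comb = Nat.choose, exact for the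
-- nonnegative n and r reached here (inside gould, n ≥ 1 and r ≥ 0).
def pvPascal (n : Int) : List Int :=
  (PySem.List.pyRange 0 (n + 1) 1).map (fun r => (n.toNat.choose r.toNat : Int))
-- the two accumulator loops of gould; `if num % 2:` is truthy iff num % 2 ≠ 0
def gould (n : Int) : List Int :=
  (pvNatural n).foldl
    (fun numbers i =>
      numbers ++ [(pvPascal i).foldl
        (fun count num => if PySem.Int.mod num 2 ≠ 0 then count + 1 else count) 0])
    []

-- ===== PORT B =====
-- B raises on n ≤ 0 exactly as A does (outside Pre_gould);
-- bin(i).count("1") for i ≥ 0 is the population count = PySem.Int.bitCount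
def gould_alt (n : Int) : List Int :=
  (PySem.List.pyRange 1 (n + 1) 1).map (fun i => (2 : Int) ^ PySem.Int.bitCount i)

-- ===== PRECONDITION & SPEC =====
-- Both A and B raise ValueError for every n ≤ 0; Pre_ excludes exactly those inputs.
def Pre_gould (n : Int) : Prop := 1 ≤ n
instance (n : Int) : Decidable (Pre_gould n) := by unfold Pre_gould; infer_instance
def pvWitness_gould : Int := (3)

def Spec_gould (n : Int) (out : List Int) : Prop := out = gould_alt n
instance (n : Int) (out : List Int) : Decidable (Spec_gould n out) := by unfold Spec_gould; infer_instance

-- ===== CLAIM (what is proved, stated in full; the proofs are below) =====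
def Claim_equal_gould : Prop := ∀ (n : Int), Dom_gould n → Pre_gould n → Spec_gould n (gould n)

-- ===== LEMMAS AND PROOFS =====

-- a countP over List.range as a Finset sum of 0/1 terms
theorem countP_range_eq_sum (n : Nat) (p : Nat → Bool) :
    (List.range n).countP p = ∑ r ∈ Finset.range n, if p r then 1 else 0 := by
  induction n with
  | zero => simp
  | succ k ih =>
    rw [List.range_succ, List.countP_append, Finset.sum_range_succ, ih]
    simp [List.countP_cons]

-- a sum over range (2k) split into even/odd index pairs
theorem sum_range_double (k : Nat) (f : Nat → Nat) :
    ∑ i ∈ Finset.range (2*k), f i = ∑ j ∈ Finset.range k, (f (2*j) + f (2*j+1)) := by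
  induction k with
  | zero => simp
  | succ m ih =>
    have h : 2 * (m+1) = (2*m) + 1 + 1 := by ring
    rw [h, Finset.sum_range_succ, Finset.sum_range_succ, Finset.sum_range_succ, ih]
    ring_nf

-- Lucas' theorem at p = 2
theorem lucas_two (a b : Nat) :
    a.choose b % 2 = ((a % 2).choose (b % 2) * (a / 2).choose (b / 2)) % 2 := by
  haveI : Fact (Nat.Prime 2) := ⟨Nat.prime_two⟩
  exact Choose.choose_modEq_choose_mod_mul_choose_div_nat

-- the number of odd entries in Pascal row m is 2^popcount(m)
theorem countOdd_row (m : Nat) :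
    (List.range (m + 1)).countP (fun r => decide (m.choose r % 2 = 1))
      = 2 ^ PySem.Int.bitCount (m : Int) := by
  induction m using Nat.strong_induction_on with
  | _ m ih =>
  rcases Nat.eq_zero_or_pos m with h0 | hpos
  · subst h0; decide
  rw [countP_range_eq_sum]
  rcases Nat.even_or_odd m with ⟨a, ha⟩ | ⟨a, ha⟩
  · -- m = 2a with a ≥ 1: only even columns contribute, once each
    have key_even : ∀ j, m.choose (2*j) % 2 = a.choose j % 2 := by
      intro j
      rw [lucas_two]
      have h1 : m % 2 = 0 := by omega
      have h2 : m / 2 = a := by omega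
      have h3 : 2 * j % 2 = 0 := by omega
      have h4 : 2 * j / 2 = j := by omega
      simp [h1, h2, h3, h4]
    have key_odd : ∀ j, m.choose (2*j+1) % 2 = 0 := by
      intro j
      rw [lucas_two]
      have h1 : m % 2 = 0 := by omega
      have h3 : (2 * j + 1) % 2 = 1 := by omega
      simp [h1, h3]
    have hsplit : m + 1 = 2 * a + 1 := by omega
    rw [hsplit, Finset.sum_range_succ, sum_range_double]
    simp only [key_even, key_odd]
    simp only [decide_eq_true_eq, Nat.zero_ne_one, if_false, add_zero]
    have hia := ih a (by omega)
    rw [countP_range_eq_sum] at hia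
    simp only [decide_eq_true_eq] at hia
    rw [← Finset.sum_range_succ, hia]
    rw [PySem.Int.bitCount_natCast hpos]
    have h1 : m % 2 = 0 := by omega
    have h2 : m / 2 = a := by omega
    rw [h1, h2]
    simp
  · -- m = 2a+1: both columns of each pair contribute equally
    have key : ∀ j (b : Nat), b % 2 = 0 ∨ b % 2 = 1 → m.choose (2*j + b % 2) % 2 = a.choose j % 2 := by
      intro j b hb
      rw [lucas_two]
      have h1 : m % 2 = 1 := by omega
      have h2 : m / 2 = a := by omega
      have h5 : (2 * j + 1) / 2 = j := by omega
      rcases hb with h | h <;> simp [h1, h2, h5, h]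
    have key0 : ∀ j, m.choose (2*j) % 2 = a.choose j % 2 := by
      intro j; have := key j 0 (by omega); simpa using this
    have key1 : ∀ j, m.choose (2*j+1) % 2 = a.choose j % 2 := by
      intro j; have := key j 1 (by omega); simpa using this
    have hsplit : m + 1 = 2 * (a + 1) := by omega
    rw [hsplit, sum_range_double]
    have hterm : ∀ j, ((if decide (m.choose (2*j) % 2 = 1) then 1 else 0)
          + if decide (m.choose (2*j+1) % 2 = 1) then 1 else 0)
        = 2 * (if decide (a.choose j % 2 = 1) then 1 else 0) := by
      intro j
      simp only [key0 j, key1 j]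
      split <;> simp
    have hia := ih a (by omega)
    rw [countP_range_eq_sum] at hia
    rw [Finset.sum_congr rfl (fun j _ => hterm j), ← Finset.mul_sum, hia]
    rw [PySem.Int.bitCount_natCast hpos]
    have h1 : m % 2 = 1 := by omega
    have h2 : m / 2 = a := by omega
    rw [h1, h2]
    ring

-- A's inner counting loop over pascal(i) equals B's closed-form term, for i ≥ 1
theorem inner_eq (i : Int) (hi : 1 ≤ i) :
    (pvPascal i).foldl
        (fun count num => if PySem.Int.mod num 2 ≠ 0 then count + 1 else count) 0
      = (2 : Int) ^ PySem.Int.bitCount i := by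
  obtain ⟨m, rfl⟩ : ∃ m : Nat, i = (m : Int) := ⟨i.toNat, (Int.toNat_of_nonneg (by omega)).symm⟩
  have hfun : (fun (count : Int) num => if PySem.Int.mod num 2 ≠ 0 then count + 1 else count)
      = (fun (count : Int) num => if (decide (PySem.Int.mod num 2 ≠ 0)) = true then count + 1 else count) := by
    funext c x; simp
  rw [hfun, PySem.List.foldl_count_if]
  have hpas : pvPascal (m : Int) = (List.range (m+1)).map (fun k => (m.choose k : Int)) := by
    unfold pvPascal
    have h : ((m : Int) + 1) = ((m + 1 : Nat) : Int) := by push_cast; ring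
    rw [h, PySem.List.pyRange_zero_nat, List.map_map]
    apply List.map_congr_left
    intro k _
    simp
  rw [hpas, List.countP_map]
  have hcong : (List.range (m+1)).countP
      ((fun num => decide (PySem.Int.mod num 2 ≠ 0)) ∘ (fun k => (m.choose k : Int)))
      = (List.range (m+1)).countP (fun r => decide (m.choose r % 2 = 1)) := by
    apply List.countP_congr
    intro k _
    have h2 : PySem.Int.mod ((m.choose k : Nat) : Int) 2 = ((m.choose k % 2 : Nat) : Int) := by
      exact_mod_cast PySem.Int.mod_natCast (m.choose k) 2
    have h3 : m.choose k % 2 = 0 ∨ m.choose k % 2 = 1 := by omega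
    simp only [Function.comp, h2]
    rcases h3 with h | h <;> simp [h]
  rw [hcong, countOdd_row]
  push_cast
  ring

-- ===== VERDICT (by name: the statement is the Claim_ definition above) =====
theorem gould_spec : Claim_equal_gould := by
  intro n _ hn
  have hn1 : 1 ≤ n := hn
  unfold Spec_gould gould gould_alt pvNatural pvWhole
  rw [PySem.List.slice_from _ (by omega : (0:Int) ≤ 1),
    PySem.List.pyRange_one_cons (by omega : (0:Int) < n + 1)]
  simp only [Int.toNat_one, List.drop_one, List.tail_cons]
  rw [PySem.List.foldl_append_singleton_eq_map]
  simp only [List.nil_append]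
  apply List.map_congr_left
  intro i hi
  exact inner_eq i (PySem.List.mem_pyRange_one.mp hi).1
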